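-- pv_equiv track=rewrite | github.com/Shahid-724/learning_dsa | 57_magical_no.py | magical_no
-- ===== SOURCE A (Python) =====
-- def magical_no(n):
--
--     # Converting dec to binary
--     def dec_bin(num):
--         result = ''
--         while num:
--             result = str((num % 2) + 1) + result
--             num //= 2
--         return int(result)
--
--     # Calc the sum of digits
--     def digit_sum(num):
--         result = 0
--         while num:
--             result += num % 10
--             num //= 10
--         return result
--
--     # The actual loop
--     result = 0
--     for i in range(1, n + 1):
--         binary = dec_bin(i)
--         digit_sums = digit_sum(binary)
--         if digit_sums % 2 == 1:
--             result += 1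
--     return result
-- ===== SOURCE B (Python) =====
-- def magical_no(n):
--     # A number i is "magical" iff digit_sum(dec_bin(i)) = bit_length(i) + popcount(i)
--     # is odd, i.e. iff the count of 0-bits in i's binary representation is odd
--     # (bit_length + popcount = zeros + 2*ones  ===  zeros  (mod 2)).
--     # Counting those i in [1, n] has a closed form:
--     #   f(2k+1) = k   (evens i=2j pair up as "zeros(j) even" with odds i=2j+1 as "zeros(j) odd")
--     #   f(2k)   = f(2k+1) - [2k+1 magical] = k - (zeros(k) odd)
--     if n <= 0:
--         return 0
--     if n % 2 == 1:
--         return (n - 1) // 2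
--     m = n // 2
--     z = 0
--     while m > 1:
--         if m % 2 == 0:
--             z = 1 - z
--         m //= 2
--     return n // 2 - z
-- ===== Notes on version B (the rewrite author's own statement) =====
-- stated objective: faster
-- what changed: B replaces A's per-i loop (which builds each number's binary-as-decimal string and sums its digits) with a closed form: i is counted iff its number of binary 0-bits is odd, so the count up to an odd n is (n-1)//2 and up to an even n is n//2 minus the 0-bit parity of n//2.
import Mathlib
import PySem

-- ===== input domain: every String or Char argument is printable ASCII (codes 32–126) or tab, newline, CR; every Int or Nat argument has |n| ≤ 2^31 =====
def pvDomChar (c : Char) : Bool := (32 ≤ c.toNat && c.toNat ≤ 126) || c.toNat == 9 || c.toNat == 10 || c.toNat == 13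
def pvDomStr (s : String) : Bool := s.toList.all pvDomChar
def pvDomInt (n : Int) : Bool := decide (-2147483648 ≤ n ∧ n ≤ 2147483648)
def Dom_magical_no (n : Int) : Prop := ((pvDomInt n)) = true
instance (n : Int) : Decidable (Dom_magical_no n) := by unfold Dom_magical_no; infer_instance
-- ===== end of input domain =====

-- B re-implements A's O(n log n) per-i scan as an O(log n) closed form (count of i ≤ n whose
-- binary form has an odd number of 0-bits); equivalence of the two is proved for every Int n.

-- ===== PORT A =====
-- Python: `while num:` loops with `num //= 2` / `num //= 10`; transliterated with a fuel bound
-- num.toNat + 1 that exceeds the iteration count on every input A reaches (num ≥ 1; Python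
-- itself would not terminate on negative num, which no call site produces).
def decBinLoop (fuel : Nat) (num : Int) (result : List Char) : List Char :=
  match fuel with
  | 0 => result
  | fuel + 1 =>
    if num ≤ 0 then result
    else decBinLoop fuel (PySem.Int.floordiv num 2) (PySem.Int.toChars (PySem.Int.mod num 2 + 1) ++ result)

-- int(result): the Python str is modeled as List Char (PySem.Chars); int('') raises only for
-- num = 0, which no call site produces, so the .getD 0 default is never the returned value.
def dec_bin (num : Int) : Int :=
  (PySem.Int.ofChars? (decBinLoop (num.toNat + 1) num [])).getD 0

def digitSumLoop (fuel : Nat) (num result : Int) : Int :=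
  match fuel with
  | 0 => result
  | fuel + 1 =>
    if num ≤ 0 then result
    else digitSumLoop fuel (PySem.Int.floordiv num 10) (result + PySem.Int.mod num 10)

def digit_sum (num : Int) : Int := digitSumLoop (num.toNat + 1) num 0

def magical_no (n : Int) : Int :=
  (PySem.List.pyRange 1 (n + 1) 1).foldl (fun result i =>
    let binary := dec_bin i
    let digit_sums := digit_sum binary
    if PySem.Int.mod digit_sums 2 = 1 then result + 1 else result) 0

-- ===== PORT B =====
-- `while m > 1:` with `m //= 2`; same fuel-bound transliteration.
def zeroParityLoop (fuel : Nat) (m z : Int) : Int :=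
  match fuel with
  | 0 => z
  | fuel + 1 =>
    if m > 1 then
      zeroParityLoop fuel (PySem.Int.floordiv m 2) (if PySem.Int.mod m 2 = 0 then 1 - z else z)
    else z

def magical_no_alt (n : Int) : Int :=
  if n ≤ 0 then 0
  else if PySem.Int.mod n 2 = 1 then PySem.Int.floordiv (n - 1) 2
  else PySem.Int.floordiv n 2 -
    zeroParityLoop ((PySem.Int.floordiv n 2).toNat + 1) (PySem.Int.floordiv n 2) 0

-- ===== PRECONDITION & SPEC =====
def Spec_magical_no (n : Int) (out : Int) : Prop := out = magical_no_alt n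
instance (n : Int) (out : Int) : Decidable (Spec_magical_no n out) := by unfold Spec_magical_no; infer_instance

-- ===== CLAIM (what is proved, stated in full; the proofs are below) =====
def Claim_equal_magical_no : Prop := ∀ (n : Int), Dom_magical_no n → Spec_magical_no n (magical_no n)

-- ===== LEMMAS AND PROOFS =====

-- Reference functions on ℕ used only by the proofs.

-- binary digits of m, MSB first, written as '1'/'2' (bit + 1) — the string dec_bin builds
def binChars (m : Nat) : List Char :=
  if m = 0 then [] else binChars (m / 2) ++ [if m % 2 = 1 then '2' else '1']
decreasing_by exact Nat.div_lt_self (by omega) (by omega)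

def digits12 (ds : List Char) : Prop := ∀ c ∈ ds, c = '1' ∨ c = '2'

def dval (acc : Nat) (ds : List Char) : Nat := ds.foldl (fun a c => a * 10 + (c.toNat - 48)) acc

def VN (m : Nat) : Nat := dval 0 (binChars m)

-- decimal digit sum
def dsum (m : Nat) : Nat :=
  if m = 0 then 0 else m % 10 + dsum (m / 10)
decreasing_by exact Nat.div_lt_self (by omega) (by omega)

-- bit_length + popcount
def Sref (m : Nat) : Nat :=
  if m = 0 then 0 else m % 2 + 1 + Sref (m / 2)
decreasing_by exact Nat.div_lt_self (by omega) (by omega)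

-- number of 0-bits in the binary representation
def zc (m : Nat) : Nat :=
  if m ≤ 1 then 0 else (1 - m % 2) + zc (m / 2)
decreasing_by exact Nat.div_lt_self (by omega) (by omega)

def gref (i : Nat) : Nat := if zc i % 2 = 1 then 1 else 0

def Fref : Nat → Nat
  | 0 => 0
  | N + 1 => Fref N + gref (N + 1)

-- ---- parsing ofChars? on all-digit ('1'/'2') strings, via abstraction over the parser's
-- private worker (its defining equations are discharged by rfl at the use site) ----

theorem go_abstract (g : List Char → Bool → Nat → Option Nat)
    (h1 : ∀ rest b acc, g ('1' :: rest) b acc = g rest true (acc * 10 + 1))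
    (h2 : ∀ rest b acc, g ('2' :: rest) b acc = g rest true (acc * 10 + 2))
    (h0 : ∀ acc, g [] true acc = some acc) :
    ∀ ds, digits12 ds → ∀ acc, g ds true acc = some (dval acc ds) := by
  intro ds
  induction ds with
  | nil => intro _ acc; simpa [dval] using h0 acc
  | cons c t ih =>
    intro hd acc
    have ht : digits12 t := fun x hx => hd x (List.mem_cons_of_mem _ hx)
    rcases hd c List.mem_cons_self with rfl | rfl
    · rw [h1, ih ht (acc * 10 + 1)]; simp [dval]
    · rw [h2, ih ht (acc * 10 + 2)]; simp [dval]

theorem dv_abstract (dv : List Char → Option Nat) (g : List Char → Bool → Nat → Option Nat)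
    (hd1 : ∀ rest, dv ('1' :: rest) = g rest true 1)
    (hd2 : ∀ rest, dv ('2' :: rest) = g rest true 2)
    (h1 : ∀ rest b acc, g ('1' :: rest) b acc = g rest true (acc * 10 + 1))
    (h2 : ∀ rest b acc, g ('2' :: rest) b acc = g rest true (acc * 10 + 2))
    (h0 : ∀ acc, g [] true acc = some acc)
    (c : Char) (t : List Char) (hc : c = '1' ∨ c = '2') (ht : digits12 t) :
    Option.map (fun n : Int => n) ((dv (c :: t)).bind fun a => pure ((a : Nat) : Int)) =
      some ((dval 0 (c :: t) : Nat) : Int) := by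
  rcases hc with rfl | rfl
  · rw [hd1, go_abstract g h1 h2 h0 t ht 1]; simp [dval]
  · rw [hd2, go_abstract g h1 h2 h0 t ht 2]; simp [dval]

theorem strip_head (ds : List Char) (h : ∀ x, ds.head? = some x → PySem.Int.isIntSpace x = false) :
    List.dropWhile PySem.Int.isIntSpace ds = ds := by
  cases ds with
  | nil => rfl
  | cons c t => rw [List.dropWhile_cons, if_neg]; simp [h c rfl]

theorem ofChars?_digits12 (c : Char) (t : List Char) (h : digits12 (c :: t)) :
    PySem.Int.ofChars? (c :: t) = some ((dval 0 (c :: t) : Nat) : Int) := by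
  have hd : ∀ (ds : List Char), digits12 ds → ∀ x, ds.head? = some x → PySem.Int.isIntSpace x = false := by
    intro ds hds x hx
    cases ds with
    | nil => simp at hx
    | cons a b =>
      simp at hx
      rcases hds a List.mem_cons_self with rfl | rfl <;> subst hx <;> decide
  have hrev : digits12 (c :: t).reverse := fun x hx => h x (List.mem_reverse.mp hx)
  simp only [PySem.Int.ofChars?]
  rw [strip_head _ (hd _ h), strip_head _ (hd _ hrev), List.reverse_reverse]
  split
  · rename_i ds' heq; exfalso
    rcases h c List.mem_cons_self with rfl | rfl <;> simp_all
  · rename_i ds' heq; exfalso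
    rcases h c List.mem_cons_self with rfl | rfl <;> simp_all
  · exact dv_abstract _ _ (fun rest => rfl) (fun rest => rfl)
      (fun rest b acc => rfl) (fun rest b acc => rfl) (fun acc => rfl)
      c t (h c List.mem_cons_self) (fun x hx => h x (List.mem_cons_of_mem _ hx))

-- ---- characterization of A's helpers ----

theorem binChars_digits12 (m : Nat) : digits12 (binChars m) := by
  induction m using Nat.strong_induction_on with
  | _ m ih =>
    rw [binChars]
    split
    · intro c hc; simp at hc
    · rename_i hm
      intro c hc
      rcases List.mem_append.mp hc with h1 | h2
      · exact ih (m / 2) (Nat.div_lt_self (by omega) (by omega)) c h1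
      · simp at h2; subst h2; split <;> simp

theorem binChars_ne_nil (m : Nat) (hm : 1 ≤ m) : binChars m ≠ [] := by
  rw [binChars, if_neg (by omega)]
  simp

theorem toChars_one : PySem.Int.toChars 1 = ['1'] := by decide
theorem toChars_two : PySem.Int.toChars 2 = ['2'] := by decide

theorem decBinLoop_spec (m : Nat) (hm : 1 ≤ m) :
    ∀ fuel, m ≤ fuel → ∀ acc, decBinLoop fuel (m : Int) acc = binChars m ++ acc := by
  induction m using Nat.strong_induction_on with
  | _ m ih =>
    intro fuel hfuel acc
    match fuel with
    | 0 => omega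
    | fuel + 1 =>
      rw [decBinLoop]
      rw [if_neg (by exact_mod_cast (by omega : ¬ (m : Int) ≤ 0))]
      rw [show PySem.Int.floordiv (m : Int) 2 = ((m / 2 : Nat) : Int) from by
        exact_mod_cast PySem.Int.floordiv_natCast m 2]
      rw [show PySem.Int.mod (m : Int) 2 = ((m % 2 : Nat) : Int) from by
        exact_mod_cast PySem.Int.mod_natCast m 2]
      by_cases h2 : m / 2 = 0
      · have hm1 : m = 1 := by omega
        subst hm1
        norm_num [toChars_two]
        cases fuel <;> simp [decBinLoop] <;> rw [binChars] <;> simp [binChars]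
      · rcases Nat.mod_two_eq_zero_or_one m with he | ho
        · rw [he]
          norm_num [toChars_one]
          rw [show ((m:Int) / 2) = ((m / 2 : Nat) : Int) from by rw [Int.natCast_div]; norm_num]
          rw [ih (m / 2) (Nat.div_lt_self (by omega) (by omega)) (by omega) fuel (by omega)]
          conv_rhs => rw [binChars, if_neg (by omega), he]
          simp
        · rw [ho]
          norm_num [toChars_two]
          rw [show ((m:Int) / 2) = ((m / 2 : Nat) : Int) from by rw [Int.natCast_div]; norm_num]
          rw [ih (m / 2) (Nat.div_lt_self (by omega) (by omega)) (by omega) fuel (by omega)]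
          conv_rhs => rw [binChars, if_neg (by omega), ho]
          simp

theorem dec_bin_spec (m : Nat) (hm : 1 ≤ m) : dec_bin (m : Int) = (VN m : Int) := by
  unfold dec_bin
  rw [show ((m : Int)).toNat = m from Int.toNat_natCast m]
  rw [decBinLoop_spec m hm (m + 1) (by omega) [], List.append_nil]
  obtain ⟨c, t, hct⟩ := List.exists_cons_of_ne_nil (binChars_ne_nil m hm)
  rw [hct, ofChars?_digits12 c t (hct ▸ binChars_digits12 m)]
  rw [VN, hct]
  rfl

theorem VN_rec (m : Nat) (hm : 1 ≤ m) : VN m = VN (m / 2) * 10 + (m % 2 + 1) := by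
  unfold VN
  conv_lhs => rw [binChars, if_neg (by omega)]
  unfold dval
  rw [List.foldl_append]
  rcases Nat.mod_two_eq_zero_or_one m with he | he
  · simp [List.foldl, he]
  · simp [List.foldl, he]

theorem digitSumLoop_spec (m : Nat) :
    ∀ fuel, m ≤ fuel → ∀ r : Int, digitSumLoop fuel (m : Int) r = r + (dsum m : Int) := by
  induction m using Nat.strong_induction_on with
  | _ m ih =>
    intro fuel hfuel r
    match fuel with
    | 0 =>
      have hm : m = 0 := by omega
      subst hm
      rw [digitSumLoop, dsum]
      simp
    | fuel + 1 =>
      by_cases h0 : m = 0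
      · subst h0
        rw [digitSumLoop, dsum]
        simp
      · rw [digitSumLoop]
        rw [if_neg (by exact_mod_cast (by omega : ¬ (m : Int) ≤ 0))]
        rw [show PySem.Int.floordiv (m : Int) 10 = ((m / 10 : Nat) : Int) from by
          exact_mod_cast PySem.Int.floordiv_natCast m 10]
        rw [show PySem.Int.mod (m : Int) 10 = ((m % 10 : Nat) : Int) from by
          exact_mod_cast PySem.Int.mod_natCast m 10]
        rw [ih (m / 10) (Nat.div_lt_self (by omega) (by omega)) fuel (by omega)]
        conv_rhs => rw [dsum, if_neg h0]
        push_cast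
        ring

theorem dsum_VN (m : Nat) : dsum (VN m) = Sref m := by
  induction m using Nat.strong_induction_on with
  | _ m ih =>
    by_cases h0 : m = 0
    · subst h0
      have h1 : VN 0 = 0 := by rw [VN, binChars]; rfl
      rw [h1, dsum, Sref]
      simp
    · rw [VN_rec m (by omega)]
      have hkey : (VN (m / 2) * 10 + (m % 2 + 1)) % 10 = m % 2 + 1 ∧
          (VN (m / 2) * 10 + (m % 2 + 1)) / 10 = VN (m / 2) := by omega
      rw [dsum, if_neg (by omega), hkey.1, hkey.2]
      rw [ih (m / 2) (Nat.div_lt_self (by omega) (by omega))]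
      conv_rhs => rw [Sref, if_neg h0]

theorem Sref_zc (m : Nat) (hm : 1 ≤ m) : Sref m % 2 = zc m % 2 := by
  induction m using Nat.strong_induction_on with
  | _ m ih =>
    by_cases h1 : m = 1
    · subst h1
      rw [Sref, Sref, zc]
      norm_num
    · have h2 : 2 ≤ m := by omega
      rw [Sref, if_neg (by omega), zc, if_neg (by omega)]
      have := ih (m / 2) (Nat.div_lt_self (by omega) (by omega)) (by omega)
      omega

-- A's loop body adds gref i
theorem indicator_spec (m : Nat) (hm : 1 ≤ m) (acc : Int) :
    (if PySem.Int.mod (digit_sum (dec_bin (m : Int))) 2 = 1 then acc + 1 else acc) =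
      acc + (gref m : Int) := by
  rw [dec_bin_spec m hm]
  unfold digit_sum
  rw [show ((VN m : Int)).toNat = VN m from Int.toNat_natCast _]
  rw [digitSumLoop_spec (VN m) (VN m + 1) (by omega) 0, dsum_VN m, zero_add]
  rw [show PySem.Int.mod ((Sref m : Nat) : Int) 2 = ((Sref m % 2 : Nat) : Int) from by
    exact_mod_cast PySem.Int.mod_natCast (Sref m) 2]
  rw [gref]
  have hz := Sref_zc m hm
  by_cases h : zc m % 2 = 1
  · rw [if_pos (by rw [hz, h]; rfl), if_pos h]
    norm_num
  · rw [if_neg (by rw [hz]; exact_mod_cast h), if_neg h]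
    simp

theorem magical_no_nat (N : Nat) : magical_no (N : Int) = (Fref N : Int) := by
  induction N with
  | zero =>
    unfold magical_no
    rw [show ((0 : Nat) : Int) + 1 = 1 from by norm_num]
    rw [PySem.List.pyRange_one_eq_nil (by omega)]
    rfl
  | succ N ih =>
    unfold magical_no
    rw [show ((N + 1 : Nat) : Int) + 1 = (((N : Int) + 1)) + 1 from by push_cast; ring]
    rw [PySem.List.pyRange_one_succ_right (by omega), List.foldl_append]
    unfold magical_no at ih
    rw [ih]
    simp only [List.foldl]
    rw [show ((N : Int) + 1) = ((N + 1 : Nat) : Int) from by push_cast; ring]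
    rw [indicator_spec (N + 1) (by omega)]
    rw [Fref]
    push_cast
    ring

-- ---- the closed form ----

theorem zc_two_mul (k : Nat) (hk : 1 ≤ k) : zc (2 * k) = 1 + zc k := by
  rw [zc, if_neg (by omega)]
  have h1 : 2 * k % 2 = 0 := by omega
  have h2 : 2 * k / 2 = k := by omega
  rw [h1, h2]

theorem zc_two_mul_add_one (k : Nat) (hk : 1 ≤ k) : zc (2 * k + 1) = zc k := by
  rw [zc, if_neg (by omega)]
  have h1 : (2 * k + 1) % 2 = 1 := by omega
  have h2 : (2 * k + 1) / 2 = k := by omega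
  rw [h1, h2]
  omega

theorem Fref_closed (N : Nat) :
    Fref N = if N % 2 = 1 then N / 2 else N / 2 - (zc (N / 2) % 2) := by
  induction N with
  | zero =>
    rw [Fref]
    norm_num
  | succ N ih =>
    rw [Fref, ih, gref]
    have hz0 : zc 0 = 0 := by rw [zc]; norm_num
    have hz1 : zc 1 = 0 := by rw [zc]; norm_num
    rcases Nat.mod_two_eq_zero_or_one N with he | ho
    · -- N even, N + 1 odd
      by_cases hk : N / 2 = 0
      · have hN : N = 0 := by omega
        subst hN
        simp [hz0, hz1]
      · have hN1 : N + 1 = 2 * (N / 2) + 1 := by omega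
        have hzz := zc_two_mul_add_one (N / 2) (by omega)
        rw [hN1, hzz] at *
        split_ifs <;> omega
    · -- N odd, N + 1 even
      have hN1 : N + 1 = 2 * ((N + 1) / 2) := by omega
      have hk1 : 1 ≤ (N + 1) / 2 := by omega
      have hzz := zc_two_mul ((N + 1) / 2) hk1
      rw [show zc (N + 1) = zc (2 * ((N + 1) / 2)) from by rw [← hN1], hzz]
      split_ifs <;> omega

theorem zeroParityLoop_spec (m : Nat) :
    ∀ fuel, m ≤ fuel → ∀ z : Int,
      zeroParityLoop fuel (m : Int) z = if zc m % 2 = 1 then 1 - z else z := by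
  induction m using Nat.strong_induction_on with
  | _ m ih =>
    intro fuel hfuel z
    match fuel with
    | 0 =>
      have hm : m = 0 := by omega
      subst hm
      rw [zeroParityLoop, zc]
      norm_num
    | fuel + 1 =>
      by_cases h1 : m ≤ 1
      · rw [zeroParityLoop, if_neg (by exact_mod_cast (by omega : ¬ ((m : Int) > 1))),
          zc, if_pos h1]
        norm_num
      · rw [zeroParityLoop, if_pos (by exact_mod_cast (by omega : (1 : Int) < (m : Int)))]
        rw [show PySem.Int.floordiv (m : Int) 2 = ((m / 2 : Nat) : Int) from by
          exact_mod_cast PySem.Int.floordiv_natCast m 2]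
        rw [show PySem.Int.mod (m : Int) 2 = ((m % 2 : Nat) : Int) from by
          exact_mod_cast PySem.Int.mod_natCast m 2]
        rw [ih (m / 2) (Nat.div_lt_self (by omega) (by omega)) fuel (by omega)]
        conv_rhs => rw [zc, if_neg h1]
        rcases Nat.mod_two_eq_zero_or_one m with he | ho
        · rw [he]
          norm_num
          try split_ifs <;> omega
        · rw [ho]
          norm_num

-- ===== VERDICT (by name: the statement is the Claim_ definition above) =====
theorem magical_no_spec : Claim_equal_magical_no := by
  intro n _
  unfold Spec_magical_no
  by_cases hn : n ≤ 0
  · unfold magical_no magical_no_alt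
    rw [PySem.List.pyRange_one_eq_nil (by omega), if_pos hn]
    rfl
  · obtain ⟨N, rfl⟩ : ∃ N : Nat, n = (N : Int) :=
      ⟨n.toNat, (Int.toNat_of_nonneg (by omega)).symm⟩
    have hN : 1 ≤ N := by exact_mod_cast (by omega : (1 : Int) ≤ (N : Int))
    rw [magical_no_nat N, Fref_closed N]
    have hmod : PySem.Int.mod ((N : Nat) : Int) 2 = ((N % 2 : Nat) : Int) := by
      exact_mod_cast PySem.Int.mod_natCast N 2
    have hdiv : PySem.Int.floordiv ((N : Nat) : Int) 2 = ((N / 2 : Nat) : Int) := by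
      exact_mod_cast PySem.Int.floordiv_natCast N 2
    unfold magical_no_alt
    rw [if_neg hn, hmod, hdiv]
    rcases Nat.mod_two_eq_zero_or_one N with he | ho
    · rw [he, if_neg (by omega), if_neg (by exact_mod_cast (by omega : ((0 : Nat) : Int) ≠ 1))]
      rw [show (((N / 2 : Nat) : Int)).toNat = N / 2 from Int.toNat_natCast _]
      rw [zeroParityLoop_spec (N / 2) (N / 2 + 1) (by omega) 0]
      have hge : 1 ≤ N / 2 := by omega
      split_ifs with h
      · rw [h]
        omega
      · have hz0 : zc (N / 2) % 2 = 0 := by omega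
        rw [hz0]
        omega
    · rw [ho, if_pos rfl, if_pos (by norm_num)]
      rw [show ((N : Nat) : Int) - 1 = ((N - 1 : Nat) : Int) from by omega]
      rw [show PySem.Int.floordiv ((N - 1 : Nat) : Int) 2 = (((N - 1) / 2 : Nat) : Int) from by
        exact_mod_cast PySem.Int.floordiv_natCast (N - 1) 2]
      have : N / 2 = (N - 1) / 2 := by omega
      rw [this]
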